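-- pv_equiv track=rewrite | github.com/Ramsingh6688/Easymode | Day_2/Day_3/Day4/new.py | generate_series
-- ===== SOURCE A (Python) =====
-- def generate_series(n):
--     series = []
--     num = 0
--     increment = 1
--     for _ in range(n):
--         series.append(num)
--         num += increment
--         increment += 2
--     return series
-- ===== SOURCE B (Python) =====
-- def generate_series(n):
--     series = []
--     for i in range(n):
--         series.append(i * i)
--     return series
-- ===== Notes on version B (the rewrite author's own statement) =====
-- stated objective: simpler
-- what changed: B computes each term directly as i*i over range(n) instead of A's running num/increment recurrence summing consecutive odd numbers.
import Mathlib
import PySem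

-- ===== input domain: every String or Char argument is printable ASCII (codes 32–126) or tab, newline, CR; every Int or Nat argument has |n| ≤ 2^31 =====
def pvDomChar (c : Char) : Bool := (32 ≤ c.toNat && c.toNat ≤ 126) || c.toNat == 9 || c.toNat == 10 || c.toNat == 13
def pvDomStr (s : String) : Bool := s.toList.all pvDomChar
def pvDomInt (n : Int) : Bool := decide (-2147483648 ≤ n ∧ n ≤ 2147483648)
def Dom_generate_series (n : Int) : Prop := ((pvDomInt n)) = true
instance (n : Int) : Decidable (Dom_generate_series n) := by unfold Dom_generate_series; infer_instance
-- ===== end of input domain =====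

-- B replaces A's num/increment odd-number accumulator with the direct per-element formula i*i (objective: simpler).

-- ===== PORT A =====
def generate_series (n : Int) : List Int :=
  -- series = []; num = 0; increment = 1; for _ in range(n): append num; num += increment; increment += 2
  (PySem.List.pyRange 0 n 1).foldl
    (fun (st : List Int × Int × Int) _ => (st.1 ++ [st.2.1], st.2.1 + st.2.2, st.2.2 + 2))
    ([], 0, 1) |>.1

-- ===== PORT B =====
def generate_series_alt (n : Int) : List Int :=
  -- series = []; for i in range(n): series.append(i * i)
  (PySem.List.pyRange 0 n 1).foldl (fun series i => series ++ [i * i]) []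

-- ===== PRECONDITION & SPEC =====
def Spec_generate_series (n : Int) (out : List Int) : Prop := out = generate_series_alt n
instance (n : Int) (out : List Int) : Decidable (Spec_generate_series n out) := by unfold Spec_generate_series; infer_instance

-- ===== CLAIM (what is proved, stated in full; the proofs are below) =====
def Claim_equal_generate_series : Prop := ∀ (n : Int), Dom_generate_series n → Spec_generate_series n (generate_series n)

-- ===== LEMMAS AND PROOFS =====
lemma genA_state (m : ℕ) :
    (PySem.List.pyRange 0 (m : Int) 1).foldl
      (fun (st : List Int × Int × Int) _ => (st.1 ++ [st.2.1], st.2.1 + st.2.2, st.2.2 + 2))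
      ([], 0, 1)
    = ((List.range m).map (fun k => (k : Int) * k), (m : Int) * m, 2 * (m : Int) + 1) := by
  induction m with
  | zero => rw [show ((0:ℕ):Int) = 0 from rfl, PySem.List.pyRange_one_eq_nil le_rfl]; simp
  | succ m ih =>
      rw [show ((m + 1 : ℕ) : Int) = (m : Int) + 1 by push_cast; ring,
        PySem.List.pyRange_one_succ_right (by positivity), List.foldl_append, ih]
      simp [List.range_succ]
      constructor
      · ring
      · constructor <;> push_cast <;> ring

lemma genB_state (m : ℕ) :
    (PySem.List.pyRange 0 (m : Int) 1).foldl (fun series i => series ++ [i * i]) []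
    = (List.range m).map (fun k => (k : Int) * k) := by
  induction m with
  | zero => rw [show ((0:ℕ):Int) = 0 from rfl, PySem.List.pyRange_one_eq_nil le_rfl]; rfl
  | succ m ih =>
      rw [show ((m + 1 : ℕ) : Int) = (m : Int) + 1 by push_cast; ring,
        PySem.List.pyRange_one_succ_right (by positivity), List.foldl_append, ih]
      simp [List.range_succ]

-- ===== VERDICT (by name: the statement is the Claim_ definition above) =====
theorem generate_series_spec : Claim_equal_generate_series := by
  intro n _
  unfold Spec_generate_series generate_series generate_series_alt
  by_cases h : n ≤ 0
  · rw [PySem.List.pyRange_one_eq_nil h]; rfl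
  · have hn : n = (n.toNat : Int) := (Int.toNat_of_nonneg (by omega)).symm
    rw [hn, genA_state, genB_state]
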